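-- pv_equiv track=rewrite | github.com/itsmemdtofik/Python | GeneralQuestions/RemoveDuplicates.py | getDuplicateRemovalUsingSorting
-- ===== SOURCE A (Python) =====
-- def getDuplicateRemovalUsingSorting(arr: list[int]) -> list[int]:
--     if not arr:
--         return arr
--
--     # First sort the array to bring duplicates together
--     arr_sorted = sorted(arr)
--
--     result = [arr_sorted[0]]
--
--     # Iterate through the sorted array and skip duplicates
--     for i in range(1, len(arr_sorted)):
--         if arr_sorted[i] != arr_sorted[i - 1]:
--             result.append(arr_sorted[i])
--
--     return result
-- ===== SOURCE B (Python) =====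
-- def getDuplicateRemovalUsingSorting(arr: list[int]) -> list[int]:
--     return sorted(set(arr))
-- ===== Notes on version B (the rewrite author's own statement) =====
-- stated objective: idiomatic
-- what changed: Replaced sort-then-adjacent-scan dedup with hash-set dedup followed by sorting the unique values (sorted(set(arr))), removing the explicit index loop.
import Mathlib
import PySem

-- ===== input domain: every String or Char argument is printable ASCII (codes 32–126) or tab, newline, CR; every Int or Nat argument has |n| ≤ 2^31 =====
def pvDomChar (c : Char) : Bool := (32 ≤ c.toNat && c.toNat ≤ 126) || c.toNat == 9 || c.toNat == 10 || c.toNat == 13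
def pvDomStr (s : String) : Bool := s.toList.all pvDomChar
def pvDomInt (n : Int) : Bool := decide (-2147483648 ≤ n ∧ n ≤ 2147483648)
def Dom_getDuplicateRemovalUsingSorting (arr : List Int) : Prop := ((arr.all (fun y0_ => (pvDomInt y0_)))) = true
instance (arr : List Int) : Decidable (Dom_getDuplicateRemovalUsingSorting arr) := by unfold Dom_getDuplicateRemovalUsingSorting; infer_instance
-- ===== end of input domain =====

-- B replaces A's sort-then-adjacent-scan with hash-set dedup followed by sorting (idiomatic; same cost; no mutation either way).

-- ===== PORT A =====
def getDuplicateRemovalUsingSorting (arr : List Int) : List Int :=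
  if arr = [] then arr
  else
    let arr_sorted := PySem.List.sorted arr (fun x => x)
    let result := [PySem.List.pyGetD arr_sorted 0 0]
    (PySem.List.pyRange 1 (arr_sorted.length : Int)).foldl
      (fun res i =>
        if PySem.List.pyGetD arr_sorted i 0 ≠ PySem.List.pyGetD arr_sorted (i - 1) 0 then
          res ++ [PySem.List.pyGetD arr_sorted i 0]
        else res)
      result

-- ===== PORT B =====
def getDuplicateRemovalUsingSorting_alt (arr : List Int) : List Int :=
  PySem.List.sorted (PySem.Set.ofList arr) (fun x => x)

-- ===== PRECONDITION & SPEC =====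
def Spec_getDuplicateRemovalUsingSorting (arr : List Int) (out : List Int) : Prop := out = getDuplicateRemovalUsingSorting_alt arr
instance (arr : List Int) (out : List Int) : Decidable (Spec_getDuplicateRemovalUsingSorting arr out) := by unfold Spec_getDuplicateRemovalUsingSorting; infer_instance

-- ===== CLAIM (what is proved, stated in full; the proofs are below) =====
def Claim_equal_getDuplicateRemovalUsingSorting : Prop := ∀ (arr : List Int), Dom_getDuplicateRemovalUsingSorting arr → Spec_getDuplicateRemovalUsingSorting arr (getDuplicateRemovalUsingSorting arr)

-- ===== LEMMAS AND PROOFS =====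

-- adjacent-dedup: `adjDedup p t` keeps each element of t that differs from its predecessor (p before t.head)
def adjDedup : Int → List Int → List Int
  | _, [] => []
  | p, y :: t => if y ≠ p then y :: adjDedup y t else adjDedup p t

lemma adjDedup_subset (p : Int) (t : List Int) : ∀ y ∈ adjDedup p t, y ∈ t := by
  induction t generalizing p with
  | nil => simp [adjDedup]
  | cons z t ih =>
    intro y hy
    simp only [adjDedup] at hy
    split at hy
    · rcases List.mem_cons.mp hy with rfl | h
      · simp
      · exact List.mem_cons_of_mem _ (ih z y h)
    · exact List.mem_cons_of_mem _ (ih p y hy)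

lemma mem_adjDedup_of_mem (p : Int) (t : List Int) : ∀ y ∈ t, y = p ∨ y ∈ adjDedup p t := by
  induction t generalizing p with
  | nil => simp
  | cons z t ih =>
    intro y hy
    simp only [adjDedup]
    rcases List.mem_cons.mp hy with rfl | hy
    · by_cases h : y = p
      · exact Or.inl h
      · right; simp [h]
    · by_cases h : z = p
      · subst h
        rcases ih z y hy with h' | h' <;> simp [h']
      · rcases ih z y hy with rfl | h'
        · right; simp [h]
        · right; simp [h, h']

lemma adjDedup_pairwise_lt (p : Int) (t : List Int)
    (h : (p :: t).Pairwise (fun a b => a ≤ b)) :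
    (p :: adjDedup p t).Pairwise (fun a b => a < b) := by
  induction t generalizing p with
  | nil => simp [adjDedup]
  | cons z t ih =>
    rcases List.pairwise_cons.mp h with ⟨hle, ht⟩
    simp only [adjDedup]
    by_cases hz : z = p
    · subst hz
      simp only [ne_eq, not_true_eq_false, if_false]
      apply ih
      exact List.pairwise_cons.mpr ⟨fun y hy => (List.pairwise_cons.mp ht).1 y hy, (List.pairwise_cons.mp ht).2⟩
    · simp only [ne_eq, hz, not_false_eq_true, if_true]
      have hzt := ih z ht
      have hpz : p < z := lt_of_le_of_ne (hle z (by simp)) (Ne.symm hz)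
      apply List.pairwise_cons.mpr
      refine ⟨?_, hzt⟩
      intro y hy
      rcases List.mem_cons.mp hy with rfl | hy
      · exact hpz
      · exact lt_trans hpz ((List.pairwise_cons.mp hzt).1 y hy)

-- the index loop of A equals adjDedup, on any list s and start index 1 ≤ j ≤ s.length
lemma loop_eq_adjDedup (s : List Int) (j : Nat) (acc : List Int)
    (hj : 1 ≤ j) (hjs : j ≤ s.length) :
    (PySem.List.pyRange (j : Int) (s.length : Int)).foldl
      (fun res i =>
        if PySem.List.pyGetD s i 0 ≠ PySem.List.pyGetD s (i - 1) 0 then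
          res ++ [PySem.List.pyGetD s i 0]
        else res) acc
    = acc ++ adjDedup (s.getD (j - 1) 0) (s.drop j) := by
  by_cases hlt : j < s.length
  · rw [PySem.List.pyRange_one_cons (by exact_mod_cast hlt)]
    simp only [List.foldl_cons]
    have h1 : ((j : Int) + 1) = ((j + 1 : Nat) : Int) := by push_cast; ring
    have h2 : ((j : Int) - 1) = ((j - 1 : Nat) : Int) := by omega
    rw [h1, h2, PySem.List.pyGetD_natCast, PySem.List.pyGetD_natCast]
    have hrec := loop_eq_adjDedup s (j + 1)
      (if s.getD j 0 ≠ s.getD (j - 1) 0 then acc ++ [s.getD j 0] else acc)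
      (by omega) (by omega)
    rw [hrec]
    have hdrop : s.drop j = s.getD j 0 :: s.drop (j + 1) := by
      rw [List.getD_eq_getElem s 0 hlt]
      exact (List.drop_eq_getElem_cons hlt)
    rw [hdrop]
    simp only [adjDedup, Nat.add_sub_cancel, List.getD]
    by_cases hne : s[j]?.getD 0 = s[j - 1]?.getD 0 <;> simp [hne]
  · have : s.length ≤ j := by omega
    rw [PySem.List.pyRange_one_eq_nil (by exact_mod_cast this)]
    have : s.drop j = [] := List.drop_eq_nil_of_le this
    simp [this, adjDedup]
termination_by s.length - j

lemma getA_eq (arr : List Int) (x : Int) (t : List Int)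
    (hs : PySem.List.sorted arr (fun x => x) = x :: t) (hne : arr ≠ []) :
    getDuplicateRemovalUsingSorting arr = x :: adjDedup x t := by
  unfold getDuplicateRemovalUsingSorting
  simp only [hne, if_false, hs]
  have := loop_eq_adjDedup (x :: t) 1 [PySem.List.pyGetD (x :: t) 0 0] (by omega) (by simp)
  simp only [Nat.cast_one] at this
  rw [this]
  simp [PySem.List.pyGetD]

lemma sorted_cons_pairwise_le (arr : List Int) :
    (PySem.List.sorted arr (fun x => x)).Pairwise (fun a b => a ≤ b) :=
  PySem.List.sorted_pairwise arr (fun x => x)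

-- ===== VERDICT (by name: the statement is the Claim_ definition above) =====
theorem getDuplicateRemovalUsingSorting_spec : Claim_equal_getDuplicateRemovalUsingSorting := by
  intro arr _
  unfold Spec_getDuplicateRemovalUsingSorting getDuplicateRemovalUsingSorting_alt
  by_cases hne : arr = []
  · subst hne
    simp [getDuplicateRemovalUsingSorting, PySem.Set.ofList, PySem.List.sorted]
  · obtain ⟨x, t, hs⟩ : ∃ x t, PySem.List.sorted arr (fun x => x) = x :: t := by
      cases h : PySem.List.sorted arr (fun x => x) with
      | nil => exact absurd ((PySem.List.sorted_eq_nil_iff arr _ _).mp h) hne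
      | cons x t => exact ⟨x, t, rfl⟩
    rw [getA_eq arr x t hs hne]
    have hpair : (x :: adjDedup x t).Pairwise (fun a b => a < b) := by
      apply adjDedup_pairwise_lt
      rw [← hs]; exact sorted_cons_pairwise_le arr
    have hmem : ∀ y, y ∈ x :: adjDedup x t ↔ y ∈ PySem.Set.ofList arr := by
      intro y
      rw [PySem.Set.mem_ofList]
      have hm : y ∈ arr ↔ y ∈ x :: t := by
        rw [← hs]; exact (PySem.List.mem_sorted arr (fun x => x) false y).symm
      constructor
      · intro hy
        rcases List.mem_cons.mp hy with rfl | hy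
        · exact hm.mpr (by simp)
        · exact hm.mpr (List.mem_cons_of_mem _ (adjDedup_subset x t y hy))
      · intro hy
        rcases List.mem_cons.mp (hm.mp hy) with rfl | hy
        · simp
        · rcases mem_adjDedup_of_mem x t y hy with rfl | h
          · simp
          · exact List.mem_cons_of_mem _ h
    have hperm : (x :: adjDedup x t).Perm (PySem.Set.ofList arr) :=
      (List.perm_ext_iff_of_nodup hpair.nodup (PySem.Set.nodup_ofList arr)).mpr hmem
    exact (PySem.List.sorted_eq_of_perm_of_pairwise_lt _ _ _ hperm hpair).symm
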